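-- pv_equiv track=rewrite | github.com/julio-lopezsanz/python-learning-journey | ejercicios_sets/ejercicio2_analisis_usuarios.py | analyze_users
-- ===== SOURCE A (Python) =====
-- def analyze_users(users_list):
--     """
--     Devuelve dos sets: usuarios únicos y usuarios duplicados.
--     """
--
--     unique = set()
--     duplicate = set()
--
--     for user in users_list:
--         if user in unique:
--             duplicate.add(user)
--         else:
--             unique.add(user)
--
--     return unique, duplicate
-- ===== SOURCE B (Python) =====
-- def analyze_users(users_list):
--     """
--     Devuelve dos sets: usuarios únicos y usuarios duplicados.
--     """
--     first = {}
--     for i, user in enumerate(users_list):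
--         first.setdefault(user, i)
--     unique = set(first)
--     duplicate = {user for i, user in enumerate(users_list) if first[user] != i}
--     return unique, duplicate
-- ===== Notes on version B (the rewrite author's own statement) =====
-- stated objective: alternative
-- what changed: Instead of one pass that branches per element to maintain two sets incrementally, B first tabulates a dict mapping each user to its first-occurrence index, then derives unique as the table's key set and duplicate by filtering the positions that are not a first occurrence.
import Mathlib
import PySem

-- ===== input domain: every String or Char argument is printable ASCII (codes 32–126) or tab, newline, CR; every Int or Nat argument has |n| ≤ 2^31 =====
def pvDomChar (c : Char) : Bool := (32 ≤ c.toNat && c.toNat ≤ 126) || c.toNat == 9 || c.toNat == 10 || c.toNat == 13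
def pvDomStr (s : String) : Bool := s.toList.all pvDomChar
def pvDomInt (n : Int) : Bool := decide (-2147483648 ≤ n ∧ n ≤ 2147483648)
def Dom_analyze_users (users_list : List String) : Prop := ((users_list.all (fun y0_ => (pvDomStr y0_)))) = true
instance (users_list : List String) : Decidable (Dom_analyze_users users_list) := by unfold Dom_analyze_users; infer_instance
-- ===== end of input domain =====

-- B replaces A's branch-per-element loop maintaining two sets with a tabulate-then-filter
-- decomposition: a dict of first-occurrence indices, then a positional filter; alternative, not faster.


-- ===== PORT A =====
-- for user in users_list: if user in unique: duplicate.add(user) else: unique.add(user)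
def analyze_users (users_list : List String) : List String × List String :=
  users_list.foldl
    (fun (st : List String × List String) user =>
      if PySem.Set.contains st.1 user then (st.1, PySem.Set.add st.2 user)
      else (PySem.Set.add st.1 user, st.2))
    (PySem.Set.empty, PySem.Set.empty)

-- ===== PORT B =====
-- first = {}; for i, user in enumerate(users_list): first.setdefault(user, i)
def pvFirst (users_list : List String) : PySem.Dict String Int :=
  (PySem.List.enumerate users_list).foldl
    (fun d p => d.setdefault p.2 p.1) PySem.Dict.empty

-- unique = set(first); duplicate = {user for i, user in enumerate(users_list) if first[user] != i}
-- (first[user] never raises: every element of the list is a key of `first`, so get? is exact here)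
def analyze_users_alt (users_list : List String) : List String × List String :=
  (PySem.Set.ofList (pvFirst users_list).keys,
   PySem.Set.ofList
     (((PySem.List.enumerate users_list).filter
         (fun p => (pvFirst users_list).get? p.2 != some p.1)).map Prod.snd))

-- ===== PRECONDITION & SPEC =====
def Spec_analyze_users (users_list : List String) (out : List String × List String) : Prop := out = analyze_users_alt users_list
instance (users_list : List String) (out : List String × List String) : Decidable (Spec_analyze_users users_list out) := by unfold Spec_analyze_users; infer_instance

-- ===== CLAIM (what is proved, stated in full; the proofs are below) =====
def Claim_equal_analyze_users : Prop := ∀ (users_list : List String), Dom_analyze_users users_list → Spec_analyze_users users_list (analyze_users users_list)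

-- ===== LEMMAS AND PROOFS =====

-- The common intermediate form: distinct elements in first-occurrence order, and the
-- elements whose position has an earlier occurrence (first selection = second occurrence).
def dupPrefix (l : List String) : List String :=
  ((PySem.List.enumerate l).filter
      (fun p => (l.take p.1.toNat).contains p.2)).map Prod.snd

def pvMid (l : List String) : List String × List String :=
  (PySem.Set.ofList l, PySem.Set.ofList (dupPrefix l))

-- dupPrefix, one element appended on the right.
lemma dupPrefix_append (l : List String) (u : String) :
    dupPrefix (l ++ [u])
    = dupPrefix l ++ (if l.contains u then [u] else []) := by
  unfold dupPrefix
  rw [PySem.List.enumerate_append, List.filter_append, List.map_append]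
  congr 1
  · congr 1
    apply List.filter_congr
    intro p hp
    obtain ⟨k, hk, rfl⟩ := (PySem.List.mem_enumerate_iff l 0 p).1 hp
    simp only [zero_add, Int.toNat_natCast]
    rw [List.take_append_of_le_length (le_of_lt hk)]
  · simp only [PySem.List.enumerate_cons, PySem.List.enumerate_nil]
    have hs : ((l ++ [u]).take ((0:Int) + (l.length:Int)).toNat) = l := by
      simp only [zero_add, Int.toNat_natCast]
      exact List.take_left
    simp only [List.filter, hs]
    by_cases h : u ∈ l <;> simp [h]

lemma a_eq_mid (l : List String) : analyze_users l = pvMid l := by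
  induction l using List.reverseRecOn with
  | nil => rfl
  | append_singleton l u ih =>
    have hfold : analyze_users (l ++ [u]) =
        (if u ∈ (analyze_users l).1
         then ((analyze_users l).1, PySem.Set.add (analyze_users l).2 u)
         else (PySem.Set.add (analyze_users l).1 u, (analyze_users l).2)) := by
      simp [analyze_users, List.foldl_append, PySem.Set.contains_eq_listContains]
    have hmid : pvMid (l ++ [u]) =
        (if u ∈ l then (pvMid l).1 else PySem.Set.add (pvMid l).1 u,
         if u ∈ l then PySem.Set.add (pvMid l).2 u else (pvMid l).2) := by
      unfold pvMid
      rw [dupPrefix_append, PySem.Set.ofList_append_singleton]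
      by_cases h : u ∈ l
      · simp [h, PySem.Set.add_of_mem, PySem.Set.ofList_append_singleton]
      · simp [h]
    rw [hfold, ih, hmid]
    have hmem : (u ∈ (pvMid l).1) = (u ∈ l) := by
      simp [pvMid, PySem.Set.mem_ofList]
    by_cases h : u ∈ l
    · rw [if_pos (hmem ▸ h), if_pos h, if_pos h]
    · rw [if_neg (by rw [hmem]; exact h), if_neg h, if_neg h]

-- Lookup in the first-occurrence table: generalized over the start index and accumulator.
lemma first_foldl_get? (l : List String) (s : Int) (d : PySem.Dict String Int) (u : String) :
    ((PySem.List.enumerate l s).foldl (fun d p => d.setdefault p.2 p.1) d).get? u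
    = if d.contains u then d.get? u
      else (PySem.List.index? l u).map (fun n => s + (n : Int)) := by
  induction l generalizing s d with
  | nil =>
    simp only [PySem.List.enumerate_nil, List.foldl_nil]
    by_cases h : d.contains u
    · rw [if_pos h]
    · rw [if_neg h]
      rw [(PySem.Dict.get?_eq_none_iff_contains d u).2 (by simpa using h)]
      simp [PySem.List.index?]
  | cons x l ih =>
    simp only [PySem.List.enumerate_cons, List.foldl_cons]
    rw [ih]
    by_cases hx : d.contains x
    · rw [PySem.Dict.setdefault_of_contains d s hx]
      by_cases hu : d.contains u
      · rw [if_pos hu, if_pos hu]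
      · rw [if_neg hu, if_neg hu]
        have hne : x ≠ u := fun h => hu (h ▸ hx)
        rw [PySem.List.index?_cons_of_ne l hne]
        cases PySem.List.index? l u <;> simp <;> ring
    · rw [PySem.Dict.setdefault_of_not_contains d s (by simpa using hx)]
      by_cases hux : u = x
      · subst hux
        rw [if_pos (PySem.Dict.contains_insert_self d u s), if_neg hx]
        rw [PySem.Dict.get?_insert_self, PySem.List.index?_cons_self]
        simp
      · have hcl : (d.insert x s).contains u = d.contains u := by
          rw [PySem.Dict.contains_insert]
          simp [show (u == x) = false from beq_eq_false_iff_ne.2 hux]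
        rw [hcl]
        by_cases hu : d.contains u
        · rw [if_pos hu, if_pos hu,
            PySem.Dict.get?_insert_of_ne d s hux]
        · rw [if_neg hu, if_neg hu,
            PySem.List.index?_cons_of_ne l (Ne.symm hux)]
          cases PySem.List.index? l u <;> simp <;> ring

lemma first_get? (l : List String) (u : String) :
    (pvFirst l).get? u = (PySem.List.index? l u).map (fun n => (n : Int)) := by
  unfold pvFirst
  rw [first_foldl_get? l 0 PySem.Dict.empty u]
  rw [if_neg (by simp [PySem.Dict.contains_empty])]
  cases PySem.List.index? l u <;> simp

-- At a position k with l[k] = u, "first index of u ≠ k" ↔ "u occurs in the prefix before k".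
lemma first_ne_iff_mem_take (l : List String) (k : Nat) (hk : k < l.length) :
    (∀ j, PySem.List.index? l l[k] = some j → j ≠ k) ↔ l[k] ∈ l.take k := by
  have hmem : l[k] ∈ l := List.getElem_mem hk
  obtain ⟨j, hj⟩ := Option.isSome_iff_exists.1 ((PySem.List.index?_isSome_iff l l[k]).2 hmem)
  obtain ⟨hjlt, hjget, hjmin⟩ := PySem.List.getElem_of_index?_eq_some hj
  have hjk : j ≤ k := by
    by_contra h
    exact hjmin k (by omega) rfl
  constructor
  · intro h
    have hne : j ≠ k := h j hj
    have hjk' : j < k := lt_of_le_of_ne hjk hne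
    have hlen : j < (l.take k).length := by
      rw [List.length_take]; omega
    have : l[k] = (l.take k)[j]'hlen := by
      rw [List.getElem_take]; exact hjget.symm
    rw [this]
    exact List.getElem_mem _
  · intro hmem' j' hj'
    rw [hj] at hj'
    obtain rfl : j = j' := by injection hj'
    obtain ⟨m, hm, hmu⟩ := List.getElem_of_mem hmem'
    have hmk : m < k := by
      have := List.length_take_le k l
      have hmlt : m < min k l.length := by
        simpa using hm
      omega
    have hmu' : l[m]'(by omega) = l[k] := by
      rw [← hmu, List.getElem_take]
    intro hjk'
    subst hjk'
    exact hjmin m hmk hmu'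

lemma keys_first (l : List String) : (pvFirst l).keys = PySem.Set.ofList l := by
  unfold pvFirst
  have h : ∀ (d : PySem.Dict String Int) (xs : List (Int × String)),
      (xs.foldl (fun d p => d.setdefault p.2 p.1) d).keys
      = PySem.Set.update d.keys (xs.map Prod.snd) := by
    intro d xs
    induction xs generalizing d with
    | nil => simp [PySem.Set.update_nil]
    | cons p xs ih =>
      simp only [List.foldl_cons, List.map_cons, PySem.Set.update_cons]
      rw [ih]
      congr 1
      by_cases h : d.contains p.2
      · rw [PySem.Dict.setdefault_of_contains d p.1 h,
          PySem.Set.add_of_mem ((PySem.Dict.contains_iff_mem_keys d p.2).1 h)]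
      · rw [PySem.Dict.setdefault_of_not_contains d p.1 (by simpa using h),
          PySem.Dict.keys_insert_of_not_contains d p.1 (by simpa using h),
          PySem.Set.add_of_not_mem (fun hm => h ((PySem.Dict.contains_iff_mem_keys d p.2).2 hm))]
  rw [h, PySem.List.map_snd_enumerate, PySem.Dict.keys_empty,
    PySem.Set.update_nil_left]

lemma filter_first_eq_prefix (l : List String) :
    (PySem.List.enumerate l).filter (fun p => (pvFirst l).get? p.2 != some p.1)
    = (PySem.List.enumerate l).filter (fun p => (l.take p.1.toNat).contains p.2) := by
  apply List.filter_congr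
  intro p hp
  obtain ⟨k, hk, rfl⟩ := (PySem.List.mem_enumerate_iff l 0 p).1 hp
  simp only [zero_add, Int.toNat_natCast]
  rw [first_get? l l[k]]
  have hiff := first_ne_iff_mem_take l k hk
  by_cases hmem : l[k] ∈ l.take k
  · have h1 : ∀ j, PySem.List.index? l l[k] = some j → j ≠ k := hiff.2 hmem
    simp only [List.contains_eq_mem, hmem, decide_true]
    obtain ⟨j, hj⟩ := Option.isSome_iff_exists.1
      ((PySem.List.index?_isSome_iff l l[k]).2 (List.getElem_mem hk))
    rw [hj]
    have hne : j ≠ k := h1 j hj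
    simp [bne, hne]
  · have h1 : ¬ (∀ j, PySem.List.index? l l[k] = some j → j ≠ k) := fun h => hmem (hiff.1 h)
    push Not at h1
    obtain ⟨j, hj, rfl⟩ := h1
    simp only [List.contains_eq_mem, hmem, decide_false]
    rw [hj]
    simp [bne]

lemma alt_eq_mid (l : List String) : analyze_users_alt l = pvMid l := by
  unfold analyze_users_alt pvMid dupPrefix
  rw [keys_first, PySem.Set.ofList_ofList, filter_first_eq_prefix]

-- ===== VERDICT (by name: the statement is the Claim_ definition above) =====
theorem analyze_users_spec : Claim_equal_analyze_users := by
  intro l _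
  unfold Spec_analyze_users
  rw [a_eq_mid, alt_eq_mid]
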